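-- pv_equiv track=rewrite | github.com/matttang27/GOPSsolver | ai/common.py | guaranteed
-- ===== SOURCE A (Python) =====
-- def guaranteed(cardsA: tuple[int, ...], cardsB: tuple[int, ...], pointDiff: int, prizes: tuple[int, ...]) -> int:
--     """
--     Check if one side has enough cards higher than the other to guarantee a win.
--     """
--     cardsLeft = len(prizes)
--     sorted_prizes = sorted(prizes, reverse=True)
--     guarantee = [sum(sorted_prizes[:i]) - sum(sorted_prizes[i:]) for i in range(cardsLeft + 1)]
--
--     guaranteeA = sum(1 for card in cardsA if card > cardsB[-1])
--     guaranteeB = sum(1 for card in cardsB if card > cardsA[-1])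
--     if guaranteeA > cardsLeft:
--         guaranteeA = cardsLeft
--     if guaranteeB > cardsLeft:
--         guaranteeB = cardsLeft
--
--     if (guarantee[guaranteeA] + pointDiff) > 0:
--         return 1
--     elif (pointDiff - guarantee[guaranteeB]) < 0:
--         return -1
--     else:
--         return 0
-- ===== SOURCE B (Python) =====
-- def guaranteed(cardsA, cardsB, pointDiff, prizes):
--     n = len(prizes)
--     sp = sorted(prizes, reverse=True)
--     pref = [0]
--     for x in sp:
--         pref.append(pref[-1] + x)
--     total = pref[n]
--     gA = min(len([c for c in cardsA if c > cardsB[-1]]), n)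
--     gB = min(len([c for c in cardsB if c > cardsA[-1]]), n)
--     if 2 * pref[gA] - total + pointDiff > 0:
--         return 1
--     if pointDiff - (2 * pref[gB] - total) < 0:
--         return -1
--     return 0
-- ===== Notes on version B (the rewrite author's own statement) =====
-- stated objective: faster
-- what changed: Replaces the quadratic list of all n+1 slice-sum guarantee values with a single prefix-sum pass over the sorted prizes and computes only the two needed values as 2*pref[i]-total.
import Mathlib
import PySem

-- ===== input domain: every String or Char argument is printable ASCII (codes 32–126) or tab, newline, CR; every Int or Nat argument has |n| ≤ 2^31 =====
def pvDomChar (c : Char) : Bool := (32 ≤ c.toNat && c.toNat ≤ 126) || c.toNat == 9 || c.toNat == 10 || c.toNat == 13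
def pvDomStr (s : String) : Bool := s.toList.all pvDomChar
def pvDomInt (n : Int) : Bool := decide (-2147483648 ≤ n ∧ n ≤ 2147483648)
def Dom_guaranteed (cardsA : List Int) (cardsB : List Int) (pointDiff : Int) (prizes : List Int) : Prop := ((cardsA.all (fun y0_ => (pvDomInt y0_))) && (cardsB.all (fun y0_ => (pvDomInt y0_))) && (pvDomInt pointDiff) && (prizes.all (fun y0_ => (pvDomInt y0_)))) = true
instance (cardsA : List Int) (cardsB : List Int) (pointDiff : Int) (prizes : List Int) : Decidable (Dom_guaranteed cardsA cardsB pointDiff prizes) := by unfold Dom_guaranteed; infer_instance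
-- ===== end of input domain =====

-- B replaces A's quadratic list of all n+1 slice-sum guarantee values by one prefix-sum pass
-- over the sorted prizes and reads off only the two needed values (objective: faster).


-- ===== PORT A =====
def guaranteed (cardsA : List Int) (cardsB : List Int) (pointDiff : Int) (prizes : List Int) : Int :=
  let cardsLeft : Int := prizes.length
  let sorted_prizes := PySem.List.sorted prizes (fun x => x) true
  let guarantee := (PySem.List.pyRange 0 (cardsLeft + 1) 1).map
      (fun i => (PySem.List.slice sorted_prizes none (some i)).sum
              - (PySem.List.slice sorted_prizes (some i) none).sum)
  -- cardsB[-1] / cardsA[-1]: IndexError on an empty list (excluded by Pre_); the .getD 0 default is never reached there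
  let lastB := (PySem.List.pyGet? cardsB (-1)).getD 0
  let lastA := (PySem.List.pyGet? cardsA (-1)).getD 0
  let guaranteeA := cardsA.foldl (fun acc card => if card > lastB then acc + 1 else acc) (0 : Int)
  let guaranteeB := cardsB.foldl (fun acc card => if card > lastA then acc + 1 else acc) (0 : Int)
  let guaranteeA := if guaranteeA > cardsLeft then cardsLeft else guaranteeA
  let guaranteeB := if guaranteeB > cardsLeft then cardsLeft else guaranteeB
  -- guarantee[guaranteeA] is always in range (0 ≤ guaranteeA ≤ cardsLeft), so the getD default is never used
  if PySem.List.pyGetD guarantee guaranteeA 0 + pointDiff > 0 then 1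
  else if pointDiff - PySem.List.pyGetD guarantee guaranteeB 0 < 0 then -1
  else 0

-- ===== PORT B =====
def guaranteed_alt (cardsA : List Int) (cardsB : List Int) (pointDiff : Int) (prizes : List Int) : Int :=
  let n : Int := prizes.length
  let sp := PySem.List.sorted prizes (fun x => x) true
  -- pref[-1] inside the loop: pref is always nonempty, so pyGet? never returns none here
  let pref := sp.foldl (fun acc x => acc ++ [(PySem.List.pyGet? acc (-1)).getD 0 + x]) [(0 : Int)]
  let total := PySem.List.pyGetD pref n 0
  -- cardsB[-1] / cardsA[-1]: IndexError on an empty list (excluded by Pre_)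
  let gA := min ((cardsA.filter (fun c => c > (PySem.List.pyGet? cardsB (-1)).getD 0)).length : Int) n
  let gB := min ((cardsB.filter (fun c => c > (PySem.List.pyGet? cardsA (-1)).getD 0)).length : Int) n
  if 2 * PySem.List.pyGetD pref gA 0 - total + pointDiff > 0 then 1
  else if pointDiff - (2 * PySem.List.pyGetD pref gB 0 - total) < 0 then -1
  else 0

-- ===== PRECONDITION & SPEC =====
-- Pre_ excludes exactly the inputs where the Python A raises IndexError: empty cardsA or cardsB (cardsA[-1] / cardsB[-1]).
def Pre_guaranteed (cardsA : List Int) (cardsB : List Int) (pointDiff : Int) (prizes : List Int) : Prop :=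
  cardsA ≠ [] ∧ cardsB ≠ []
instance (cardsA : List Int) (cardsB : List Int) (pointDiff : Int) (prizes : List Int) : Decidable (Pre_guaranteed cardsA cardsB pointDiff prizes) := by unfold Pre_guaranteed; infer_instance
def pvWitness_guaranteed : List Int × List Int × Int × List Int := ([1], [2], 0, [3, 1])

def Spec_guaranteed (cardsA : List Int) (cardsB : List Int) (pointDiff : Int) (prizes : List Int) (out : Int) : Prop := out = guaranteed_alt cardsA cardsB pointDiff prizes
instance (cardsA : List Int) (cardsB : List Int) (pointDiff : Int) (prizes : List Int) (out : Int) : Decidable (Spec_guaranteed cardsA cardsB pointDiff prizes out) := by unfold Spec_guaranteed; infer_instance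

-- ===== CLAIM (what is proved, stated in full; the proofs are below) =====
def Claim_equal_guaranteed : Prop := ∀ (cardsA : List Int) (cardsB : List Int) (pointDiff : Int) (prizes : List Int), Dom_guaranteed cardsA cardsB pointDiff prizes → Pre_guaranteed cardsA cardsB pointDiff prizes → Spec_guaranteed cardsA cardsB pointDiff prizes (guaranteed cardsA cardsB pointDiff prizes)

-- ===== LEMMAS AND PROOFS =====

-- B's prefix-sum loop builds exactly the list of partial sums of sp (shifted by the seed s)
lemma pref_loop_eq (sp : List Int) (ys : List Int) (s : Int) :
    sp.foldl (fun acc x => acc ++ [(PySem.List.pyGet? acc (-1)).getD 0 + x]) (ys ++ [s])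
      = ys ++ (List.range (sp.length + 1)).map (fun k => s + (sp.take k).sum) := by
  induction sp generalizing ys s with
  | nil => simp
  | cons x t ih =>
    simp only [List.foldl_cons, PySem.List.pyGet?_neg_one_append_singleton, Option.getD_some,
      List.append_assoc]
    rw [← List.append_assoc, ih]
    simp [List.range_succ_eq_map, List.map_map, Function.comp, add_assoc]

-- A's guarantee-table entry at an in-range index i is (take-sum) − (drop-sum)
lemma guarantee_get (sp : List Int) (i : Int) (h0 : 0 ≤ i) (h1 : i ≤ (sp.length : Int)) :
    PySem.List.pyGetD ((PySem.List.pyRange 0 ((sp.length : Int) + 1) 1).map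
      (fun j => (PySem.List.slice sp none (some j)).sum - (PySem.List.slice sp (some j) none).sum)) i 0
    = (sp.take i.toNat).sum - (sp.drop i.toNat).sum := by
  rw [PySem.List.pyGetD_map_pyRange_of_nonneg _ _ _ _ h0 (by omega)]
  rw [PySem.List.slice_to _ h0, PySem.List.slice_from _ h0]

-- B's pref list at an in-range index i is the take-sum
lemma pref_get (sp : List Int) (i : Int) (h0 : 0 ≤ i) (h1 : i ≤ (sp.length : Int)) :
    PySem.List.pyGetD (sp.foldl (fun acc x => acc ++ [(PySem.List.pyGet? acc (-1)).getD 0 + x]) [(0 : Int)]) i 0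
    = (sp.take i.toNat).sum := by
  rw [show [(0:Int)] = ([] ++ [0] : List Int) from rfl, pref_loop_eq,
      PySem.List.pyGetD_of_nonneg _ _ h0]
  have hk : i.toNat < sp.length + 1 := by omega
  simp [List.getD_eq_getElem?_getD, hk]

lemma AeqB (cardsA cardsB : List Int) (pointDiff : Int) (prizes : List Int) :
    guaranteed cardsA cardsB pointDiff prizes = guaranteed_alt cardsA cardsB pointDiff prizes := by
  unfold guaranteed guaranteed_alt
  have hlen := PySem.List.length_sorted prizes (fun x => x) true
  set sp := PySem.List.sorted prizes (fun x => x) true with hsp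
  simp only [← hlen]
  rw [PySem.List.foldl_ite_add_one, PySem.List.foldl_ite_add_one]
  simp only [zero_add, ← List.countP_eq_length_filter]
  set cA := (cardsA.countP (fun c => decide (c > (PySem.List.pyGet? cardsB (-1)).getD 0)) : Int) with hcA
  set cB := (cardsB.countP (fun c => decide (c > (PySem.List.pyGet? cardsA (-1)).getD 0)) : Int) with hcB
  have hcA0 : 0 ≤ cA := by positivity
  have hcB0 : 0 ≤ cB := by positivity
  have clampA : (if cA > (sp.length : Int) then (sp.length : Int) else cA) = min cA (sp.length : Int) := by omega
  have clampB : (if cB > (sp.length : Int) then (sp.length : Int) else cB) = min cB (sp.length : Int) := by omega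
  rw [clampA, clampB]
  have hiA0 : 0 ≤ min cA (sp.length : Int) := by omega
  have hiA1 : min cA (sp.length : Int) ≤ (sp.length : Int) := by omega
  have hiB0 : 0 ≤ min cB (sp.length : Int) := by omega
  have hiB1 : min cB (sp.length : Int) ≤ (sp.length : Int) := by omega
  rw [guarantee_get sp _ hiA0 hiA1, guarantee_get sp _ hiB0 hiB1,
      pref_get sp _ hiA0 hiA1, pref_get sp _ hiB0 hiB1,
      pref_get sp _ (by omega) (le_refl _)]
  have htot : (sp.take (sp.length : Int).toNat).sum = sp.sum := by simp
  rw [htot]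
  have e1 := List.sum_take_add_sum_drop sp (min cA (sp.length : Int)).toNat
  have e2 := List.sum_take_add_sum_drop sp (min cB (sp.length : Int)).toNat
  have h1 : (sp.take (min cA (sp.length:Int)).toNat).sum - (sp.drop (min cA (sp.length:Int)).toNat).sum
      = 2 * (sp.take (min cA (sp.length:Int)).toNat).sum - sp.sum := by omega
  have h2 : (sp.take (min cB (sp.length:Int)).toNat).sum - (sp.drop (min cB (sp.length:Int)).toNat).sum
      = 2 * (sp.take (min cB (sp.length:Int)).toNat).sum - sp.sum := by omega
  rw [h1, h2]

-- ===== VERDICT (by name: the statement is the Claim_ definition above) =====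
theorem guaranteed_spec : Claim_equal_guaranteed := by
  intro cardsA cardsB pointDiff prizes _ _
  exact AeqB cardsA cardsB pointDiff prizes
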